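-- pv_equiv track=rewrite | github.com/goldsergeant/Algorithm-problem-solving | 프로그래머스/1/17681. ［1차］ 비밀지도/［1차］ 비밀지도.py | solution
-- ===== SOURCE A (Python) =====
-- def solution(n, arr1, arr2):
--     answer = []
--     board1=[[] for _ in range(n)]
--     board2=[[] for _ in range(n)]
--     for i in range(n):
--         board1[i]=list(map(int,bin(arr1[i])[2:].zfill(n)))
--         board2[i]=list(map(int,bin(arr2[i])[2:].zfill(n)))
--
--     for i in range(n):
--         arr=[]
--         for j in range(n):
--             if board1[i][j] or board2[i][j]:
--                 arr.append('#')
--             else: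
--                 arr.append(' ')
--         answer.append(''.join(arr))
--
--     return answer
-- ===== SOURCE B (Python) =====
-- def _row(v, width):
--     # Recursively build one row back-to-front: the last character is the lowest
--     # bit of v, the prefix is the row for v >> 1 one bit narrower.
--     if width == 0:
--         return ''
--     return _row(v >> 1, width - 1) + ('#' if v & 1 else ' ')
--
--
-- def solution(n, arr1, arr2):
--     return [_row(arr1[i] | arr2[i], n) for i in range(n)]
-- ===== Notes on version B (the rewrite author's own statement) =====
-- stated objective: simpler
-- what changed: Replaces A's bin-string formatting, zfill padding and two n-by-n digit-list matrices with a single integer OR per row and a recursive arithmetic bit extraction (_row builds each row back-to-front from v>>1 and v&1), with no binary strings or digit matrices at all.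
-- outside the precondition, e.g. on solution(1, [2], [0]): A returns ['#'], B returns [' ']; on solution(1, [-1], [0]): A raises ValueError, B returns ['#']
import Mathlib
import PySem

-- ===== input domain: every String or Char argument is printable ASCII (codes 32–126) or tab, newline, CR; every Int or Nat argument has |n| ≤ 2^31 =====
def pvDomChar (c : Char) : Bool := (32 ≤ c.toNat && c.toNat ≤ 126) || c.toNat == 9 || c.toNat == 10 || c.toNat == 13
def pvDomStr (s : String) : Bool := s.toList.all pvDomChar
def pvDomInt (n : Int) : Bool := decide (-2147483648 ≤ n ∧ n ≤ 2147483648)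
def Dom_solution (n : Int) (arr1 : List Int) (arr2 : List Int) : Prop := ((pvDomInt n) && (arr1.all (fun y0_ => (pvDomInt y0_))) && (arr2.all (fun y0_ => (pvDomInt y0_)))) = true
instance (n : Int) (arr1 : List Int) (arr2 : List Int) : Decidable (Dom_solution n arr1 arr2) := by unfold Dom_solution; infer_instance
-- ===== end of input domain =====

-- B replaces A's bin-string formatting, zfill and two n×n digit-list matrices by a single
-- integer OR per row and a recursive arithmetic bit extraction building each row
-- back-to-front (objective: simpler).

-- ===== PORT A =====
-- int(c) for a single digit character (A only applies it to '0'/'1' from bin, where it is exact)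
def pvIntOfDigit (c : Char) : Int := (c.toNat : Int) - 48

def solution (n : Int) (arr1 : List Int) (arr2 : List Int) : List String :=
  -- board1[i] = list(map(int, bin(arr1[i])[2:].zfill(n))); [2:] = List.drop 2 (bin output has ≥ 2 chars)
  let board1 := (PySem.List.pyRange 0 n 1).map (fun i =>
    (PySem.Chars.zfill ((PySem.Int.toBinChars0b (PySem.List.pyGetD arr1 i 0)).drop 2) n).map pvIntOfDigit)
  let board2 := (PySem.List.pyRange 0 n 1).map (fun i =>
    (PySem.Chars.zfill ((PySem.Int.toBinChars0b (PySem.List.pyGetD arr2 i 0)).drop 2) n).map pvIntOfDigit)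
  (PySem.List.pyRange 0 n 1).map (fun i =>
    String.mk ((PySem.List.pyRange 0 n 1).map (fun j =>
      -- `if board1[i][j] or board2[i][j]`: int truthiness = nonzero
      if PySem.List.pyGetD (PySem.List.pyGetD board1 i []) j 0 ≠ 0 ∨
         PySem.List.pyGetD (PySem.List.pyGetD board2 i []) j 0 ≠ 0 then '#' else ' ')))

-- ===== PORT B =====
-- _row(v, width): recursion on width; B only calls it with width = n ≥ 0, where Nat-recursion
-- on n.toNat is exact; v >> 1 = floor division by 2 and v & 1 = band v 1, exact on all ints
def pvRowB (v : Int) (width : Nat) : List Char :=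
  match width with
  | 0 => []
  | w + 1 => pvRowB (PySem.Int.floordiv v 2) w ++ [if PySem.Int.band v 1 ≠ 0 then '#' else ' ']

def solution_alt (n : Int) (arr1 : List Int) (arr2 : List Int) : List String :=
  (PySem.List.pyRange 0 n 1).map (fun i =>
    String.mk (pvRowB (PySem.Int.bor (PySem.List.pyGetD arr1 i 0) (PySem.List.pyGetD arr2 i 0)) n.toNat))

-- ===== PRECONDITION & SPEC =====
-- Pre_ excludes rows with a negative entry among the first n (bin gives '-0b…', so A's int('b…')
-- raises ValueError) and rows with an entry ≥ 2^n, an over-wide corner outside the n×n-map domain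
-- where A accidentally reads the top n bits of each row independently while B reads the low n bits
-- of the OR — neither value is the specified one.
def Pre_solution (n : Int) (arr1 : List Int) (arr2 : List Int) : Prop :=
  n ≤ (arr1.length : Int) ∧ n ≤ (arr2.length : Int) ∧
  (∀ x ∈ arr1.take n.toNat, 0 ≤ x ∧ x < 2 ^ n.toNat) ∧
  (∀ x ∈ arr2.take n.toNat, 0 ≤ x ∧ x < 2 ^ n.toNat)
instance (n : Int) (arr1 : List Int) (arr2 : List Int) : Decidable (Pre_solution n arr1 arr2) := by
  unfold Pre_solution; infer_instance

def pvWitness_solution : Int × List Int × List Int := (2, [1, 2], [2, 1])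

def Spec_solution (n : Int) (arr1 : List Int) (arr2 : List Int) (out : List String) : Prop := out = solution_alt n arr1 arr2
instance (n : Int) (arr1 : List Int) (arr2 : List Int) (out : List String) : Decidable (Spec_solution n arr1 arr2 out) := by unfold Spec_solution; infer_instance

-- ===== CLAIM (what is proved, stated in full; the proofs are below) =====
def Claim_equal_solution : Prop := ∀ (n : Int) (arr1 : List Int) (arr2 : List Int), Dom_solution n arr1 arr2 → Pre_solution n arr1 arr2 → Spec_solution n arr1 arr2 (solution n arr1 arr2)


-- ===== LEMMAS AND PROOFS =====

-- the MSB-first binary digit list Nat.toDigits 2 computes, as a structural recursion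
def pvRep2 (x : Nat) : List Char :=
  if h : x / 2 = 0 then [Nat.digitChar (x % 2)]
  else pvRep2 (x / 2) ++ [Nat.digitChar (x % 2)]
decreasing_by exact Nat.div_lt_self (by omega) (by omega)

theorem pvRep2_small {x : Nat} (h : x / 2 = 0) :
    pvRep2 x = [Nat.digitChar (x % 2)] := by
  rw [pvRep2, dif_pos h]

theorem pvRep2_big {x : Nat} (h : ¬ x / 2 = 0) :
    pvRep2 x = pvRep2 (x / 2) ++ [Nat.digitChar (x % 2)] := by
  rw [pvRep2, dif_neg h]

theorem pvToDigitsCore_eq (f : Nat) : ∀ x ds, x ≤ f →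
    Nat.toDigitsCore 2 (f + 1) x ds = pvRep2 x ++ ds := by
  induction f with
  | zero =>
    intro x ds hx
    interval_cases x
    rw [pvRep2_small (by omega)]
    rw [Nat.toDigitsCore]
    norm_num
  | succ f ih =>
    intro x ds hx
    rw [Nat.toDigitsCore]
    by_cases h : x / 2 = 0
    · rw [pvRep2_small h]
      simp [h]
    · simp only [h, if_false]
      rw [ih (x / 2) _ (by omega), pvRep2_big h]
      simp

theorem pvToDigits_two (x : Nat) : Nat.toDigits 2 x = pvRep2 x := by
  have := pvToDigitsCore_eq x x [] (le_refl x)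
  simpa [Nat.toDigits] using this

theorem pvRep2_digits (x : Nat) : ∀ c ∈ pvRep2 x, c = '0' ∨ c = '1' := by
  induction x using Nat.strong_induction_on with
  | _ x ih =>
    have hm : x % 2 = 0 ∨ x % 2 = 1 := Nat.mod_two_eq_zero_or_one x
    have hd : Nat.digitChar (x % 2) = '0' ∨ Nat.digitChar (x % 2) = '1' := by
      rcases hm with hm | hm <;> rw [hm] <;> simp [Nat.digitChar]
    by_cases h : x / 2 = 0
    · rw [pvRep2_small h]
      intro c hc
      simp only [List.mem_singleton] at hc
      subst hc; exact hd
    · rw [pvRep2_big h]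
      intro c hc
      rcases List.mem_append.mp hc with hc | hc
      · exact ih (x / 2) (Nat.div_lt_self (by omega) (by omega)) c hc
      · simp only [List.mem_singleton] at hc
        subst hc; exact hd

theorem pvRep2_length (N : Nat) : ∀ x, 0 < N → x < 2 ^ N → (pvRep2 x).length ≤ N := by
  induction N with
  | zero => omega
  | succ N ih =>
    intro x _ hx
    by_cases h : x / 2 = 0
    · rw [pvRep2_small h]; simp
    · rw [pvRep2_big h]
      have hN : 0 < N := by
        by_contra hN
        have : N = 0 := by omega
        subst this
        simp at hx
        omega
      have hxd : x / 2 < 2 ^ N := by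
        have : 2 ^ (N + 1) = 2 * 2 ^ N := by ring
        omega
      have := ih (x / 2) hN hxd
      simp only [List.length_append, List.length_cons, List.length_nil]
      omega

-- zfill on a sign-free character list is plain left zero padding
theorem pvZfill_eq_pad (cs : List Char) (h : ∀ c ∈ cs, c = '0' ∨ c = '1') (N : Nat) :
    PySem.Chars.zfill cs (N : Int) = List.replicate (N - cs.length) '0' ++ cs := by
  unfold PySem.Chars.zfill
  by_cases hle : (N : Int) ≤ (cs.length : Int)
  · have : N - cs.length = 0 := by omega
    simp [hle, this]
  · simp only [hle, if_false]
    match cs with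
    | [] => simp
    | c :: rest =>
      have hc : ¬ (c = '+' ∨ c = '-') := by
        rcases h c (List.mem_cons_self) with h0 | h0 <;> subst h0 <;> decide
      simp only [hc, if_false]
      have : (N : Int).toNat = N := Int.toNat_natCast N
      rw [this]

-- the padded binary digits of x < 2^N, bit by bit
theorem pvPadRep (N : Nat) : ∀ x : Nat, 0 < N → x < 2 ^ N →
    List.replicate (N - (pvRep2 x).length) '0' ++ pvRep2 x =
      (List.range N).map (fun j => if x.testBit (N - 1 - j) then '1' else '0') := by
  induction N with
  | zero => omega
  | succ N ih =>
    intro x _ hx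
    have hsub : ∀ j : Nat, N + 1 - 1 - j = N - j := fun j => by omega
    simp only [hsub]
    simp only [List.range_succ, List.map_append, List.map_cons, List.map_nil, Nat.sub_self]
    by_cases hN : N = 0
    · subst hN
      have hx1 : x = 0 ∨ x = 1 := by
        norm_num at hx
        omega
      rcases hx1 with rfl | rfl <;>
        rw [pvRep2_small (by omega)] <;>
        simp [Nat.digitChar, Nat.testBit_zero]
    · have hN' : 0 < N := by omega
      have hpow : 2 ^ (N + 1) = 2 * 2 ^ N := by ring
      have htail : (if x.testBit 0 then '1' else '0') = Nat.digitChar (x % 2) := by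
        rw [Nat.testBit_zero]
        rcases Nat.mod_two_eq_zero_or_one x with hm | hm <;> simp [hm, Nat.digitChar]
      by_cases h : x / 2 = 0
      · -- x < 2: one digit, padded with N zeros
        rw [pvRep2_small h]
        have hmap : (List.range N).map (fun j => if x.testBit (N - j) then '1' else '0')
            = List.replicate N '0' := by
          rw [List.eq_replicate_iff]
          refine ⟨by simp, ?_⟩
          intro c hc
          simp only [List.mem_map, List.mem_range] at hc
          obtain ⟨j, hj, rfl⟩ := hc
          have hf : x.testBit (N - j) = false := by
            apply Nat.testBit_lt_two_pow
            have h2 : 2 ^ 1 ≤ 2 ^ (N - j) := Nat.pow_le_pow_right (by omega) (by omega)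
            omega
          simp [hf]
        rw [hmap, htail]
        simp
      · -- x ≥ 2: peel the last digit
        have hxd : x / 2 < 2 ^ N := by omega
        have hlen : (pvRep2 (x / 2)).length ≤ N := pvRep2_length N (x / 2) hN' hxd
        rw [pvRep2_big h]
        have hlen2 : N + 1 - (pvRep2 (x / 2) ++ [Nat.digitChar (x % 2)]).length
            = N - (pvRep2 (x / 2)).length := by
          simp only [List.length_append, List.length_cons, List.length_nil]
          omega
        have hmap : (List.range N).map (fun j => if x.testBit (N - j) then '1' else '0')
            = (List.range N).map (fun j => if (x / 2).testBit (N - 1 - j) then '1' else '0') := by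
          apply List.map_congr_left
          intro j hj
          simp only [List.mem_range] at hj
          have h1 : N - j = (N - 1 - j) + 1 := by omega
          rw [h1, Nat.testBit_add_one]
        rw [hlen2, ← List.append_assoc, hmap, ← ih (x / 2) hN' hxd, htail]

-- the zfilled binary string of x < 2^N, as a testBit map
theorem pvRow (N : Nat) (x : Nat) (hN : 0 < N) (hx : x < 2 ^ N) :
    PySem.Chars.zfill (Nat.toDigits 2 x) (N : Int) =
      (List.range N).map (fun j => if x.testBit (N - 1 - j) then '1' else '0') := by
  rw [pvToDigits_two, pvZfill_eq_pad _ (pvRep2_digits x) N, pvPadRep N x hN hx]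

-- B's recursive row, as the same testBit map (for nonnegative v)
theorem pvRowB_eq (N : Nat) : ∀ x : Nat, pvRowB (x : Int) N =
    (List.range N).map (fun j => if x.testBit (N - 1 - j) then '#' else ' ') := by
  induction N with
  | zero => intro x; simp [pvRowB]
  | succ N ih =>
    intro x
    have hdiv : PySem.Int.floordiv (x : Int) 2 = ((x / 2 : Nat) : Int) :=
      PySem.Int.floordiv_natCast x 2
    have hband : (PySem.Int.band (x : Int) 1 ≠ 0) = (x.testBit 0 = true) := by
      have : PySem.Int.band (x : Int) (1 : Int) = ((x &&& 1 : Nat) : Int) := by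
        exact_mod_cast PySem.Int.band_natCast x 1
      rw [this]
      simp [Nat.testBit_zero, Nat.and_one_is_mod]
      omega
    simp only [pvRowB, hdiv, ih (x / 2)]
    rw [List.range_succ]
    simp only [List.map_append, List.map_cons, List.map_nil, Nat.sub_self,
      Nat.succ_sub_one]
    congr 1
    · apply List.map_congr_left
      intro j hj
      simp only [List.mem_range] at hj
      have h1 : N - j = (N - 1 - j) + 1 := by omega
      simp only [h1, Nat.testBit_add_one]
    · simp only [hband]

theorem pvTake_getD {arr : List Int} {N : Nat} (hlen : N ≤ arr.length)
    (h : ∀ x ∈ arr.take N, 0 ≤ x ∧ x < 2 ^ N) {k : Nat} (hk : k < N) :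
    0 ≤ arr.getD k 0 ∧ arr.getD k 0 < 2 ^ N := by
  have hk' : k < arr.length := by omega
  rw [List.getD_eq_getElem arr 0 hk']
  apply h
  rw [List.mem_take_iff_getElem]
  exact ⟨k, by omega, rfl⟩

-- ===== VERDICT (by name: the statement is the Claim_ definition above) =====
theorem solution_spec : Claim_equal_solution := by
  intro n arr1 arr2 _ hpre
  obtain ⟨hlen1, hlen2, hall1, hall2⟩ := hpre
  simp only [Spec_solution, solution, solution_alt]
  apply List.map_congr_left
  intro i hi
  rw [PySem.List.mem_pyRange_one] at hi
  obtain ⟨hi0, hin⟩ := hi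
  have hn0 : 0 < n := lt_of_le_of_lt hi0 hin
  rw [PySem.List.pyGetD_map_pyRange_of_nonneg _ n i _ hi0 hin,
      PySem.List.pyGetD_map_pyRange_of_nonneg _ n i _ hi0 hin]
  set N := n.toNat with hNdef
  have hn : n = (N : Int) := by omega
  have hNpos : 0 < N := by omega
  have hiN : i.toNat < N := by omega
  have hget1 : PySem.List.pyGetD arr1 i 0 = arr1.getD i.toNat 0 :=
    PySem.List.pyGetD_of_nonneg arr1 0 hi0
  have hget2 : PySem.List.pyGetD arr2 i 0 = arr2.getD i.toNat 0 :=
    PySem.List.pyGetD_of_nonneg arr2 0 hi0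
  rw [hget1, hget2]
  have hA : 0 ≤ arr1.getD i.toNat 0 ∧ arr1.getD i.toNat 0 < 2 ^ N :=
    pvTake_getD (by omega) hall1 hiN
  have hB : 0 ≤ arr2.getD i.toNat 0 ∧ arr2.getD i.toNat 0 < 2 ^ N :=
    pvTake_getD (by omega) hall2 hiN
  set a := arr1.getD i.toNat 0 with hadef
  set b := arr2.getD i.toNat 0 with hbdef
  have haN : a.toNat < 2 ^ N := by
    have h2 := hA.2
    have : ((2 : Int) ^ N) = ((2 ^ N : Nat) : Int) := by push_cast; ring
    omega
  have hbN : b.toNat < 2 ^ N := by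
    have h2 := hB.2
    have : ((2 : Int) ^ N) = ((2 ^ N : Nat) : Int) := by push_cast; ring
    omega
  have hdrop1 : (PySem.Int.toBinChars0b a).drop 2 = Nat.toDigits 2 a.toNat := by
    unfold PySem.Int.toBinChars0b
    rw [if_neg (by omega)]
    rfl
  have hdrop2 : (PySem.Int.toBinChars0b b).drop 2 = Nat.toDigits 2 b.toNat := by
    unfold PySem.Int.toBinChars0b
    rw [if_neg (by omega)]
    rfl
  have hbor : PySem.Int.bor a b = ((a.toNat ||| b.toNat : Nat) : Int) :=
    PySem.Int.bor_of_nonneg hA.1 hB.1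
  rw [hdrop1, hdrop2, hbor, hn]
  rw [pvRow N a.toNat hNpos haN, pvRow N b.toNat hNpos hbN]
  rw [pvRowB_eq N (a.toNat ||| b.toNat)]
  rw [PySem.List.pyRange_zero_natCast N]
  simp only [List.map_map]
  congr 1
  apply List.map_congr_left
  intro k hk
  simp only [List.mem_range] at hk
  simp only [Function.comp_apply]
  rw [PySem.List.pyGetD_natCast, PySem.List.pyGetD_natCast,
      PySem.List.getD_map_range _ N k 0 hk, PySem.List.getD_map_range _ N k 0 hk,
      Nat.testBit_lor]
  simp only [Function.comp_apply]
  rcases Bool.eq_false_or_eq_true (a.toNat.testBit (N - 1 - k)) with ha' | ha' <;>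
    rcases Bool.eq_false_or_eq_true (b.toNat.testBit (N - 1 - k)) with hb' | hb' <;>
    simp only [ha', hb'] <;> decide
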